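-- pv_equiv track=rewrite | github.com/minzoovv/malangmalang-brain | algorithmbook/kakao2.py | get_balanced_bracket
-- ===== SOURCE A (Python) =====
-- def get_balanced_bracket(p):
--     count = 0
--     for i in range(len(p)):
--         if p[i] == ')':
--             count += 1
--         else:
--             count -= 1
--         if count == 0:
--             return p[0:i+1]
-- ===== SOURCE B (Python) =====
-- def get_balanced_bracket(p):
--     depth = 0
--     depths = []
--     for c in p:
--         depth += 1 if c == ')' else -1
--         depths.append(depth)
--     if 0 in depths:
--         return p[:depths.index(0) + 1]
-- ===== Notes on version B (the rewrite author's own statement) =====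
-- stated objective: alternative
-- what changed: B is a two-stage pipeline: it first materialises the full running-depth list for the whole string, then locates the first 0 with list membership + depths.index(0) and slices, instead of A's single loop that early-returns the moment its counter hits zero.
-- outside the precondition, e.g. on get_balanced_bracket(''): A returns None, B returns None; on get_balanced_bracket(')'): A returns None, B returns None; on get_balanced_bracket('(('): A returns None, B returns None
import Mathlib
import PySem

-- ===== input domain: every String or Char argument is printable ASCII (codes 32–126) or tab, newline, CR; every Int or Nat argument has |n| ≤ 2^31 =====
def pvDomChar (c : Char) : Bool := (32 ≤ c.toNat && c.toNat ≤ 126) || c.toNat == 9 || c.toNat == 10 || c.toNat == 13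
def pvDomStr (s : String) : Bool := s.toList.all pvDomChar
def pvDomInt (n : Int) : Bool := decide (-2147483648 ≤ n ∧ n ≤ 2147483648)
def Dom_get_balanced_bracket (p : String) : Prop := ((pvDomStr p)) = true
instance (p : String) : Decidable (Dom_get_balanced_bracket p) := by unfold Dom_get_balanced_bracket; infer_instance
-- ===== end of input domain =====

-- B replaces A's early-returning counter loop by a two-stage pipeline: build the whole
-- running-depth list first, then locate the first 0 and slice (alternative decomposition, not faster).
-- A returns None (no String) when no prefix balances; Pre_ excludes exactly those inputs.

-- ===== PORT A =====
-- A's for-loop over range(len(p)): remaining characters with index i, running count;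
-- returns p[0:i+1] the moment count hits 0, none when the loop ends.
def pvA_go (p : List Char) (rest : List Char) (i : Nat) (count : Int) : Option (List Char) :=
  match rest with
  | [] => none
  | c :: rs =>
    let count' := if c = ')' then count + 1 else count - 1
    if count' = 0 then some (PySem.List.slice p (some 0) (some ((i + 1 : Nat) : Int)))
    else pvA_go p rs (i + 1) count'

def get_balanced_bracket (p : String) : String :=
  match pvA_go p.toList p.toList 0 0 with
  | some cs => String.ofList cs
  | none => ""          -- unreachable under Pre_ (Python A returns None here)

-- ===== PORT B =====
-- Source B: first loop builds the full depths list via a fold, then `0 in depths`,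
-- `depths.index(0)` and a slice produce the answer.
def get_balanced_bracket_alt (p : String) : String :=
  let st := p.toList.foldl
    (fun (s : Int × List Int) c =>
      let d := if c = ')' then s.1 + 1 else s.1 - 1
      (d, s.2 ++ [d])) (0, [])
  let depths := st.2
  if depths.contains 0 then
    match PySem.List.index? depths 0 with
    | some j => String.ofList (PySem.List.slice p.toList none (some ((j + 1 : Nat) : Int)))
    | none => ""        -- unreachable: contains 0 guarantees index? succeeds
  else ""               -- unreachable under Pre_ (Python B returns None here)

-- ===== PRECONDITION & SPEC =====
-- Pre_ excludes exactly the inputs on which Python A falls off its loop and returns None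
-- (no value of the declared String type): strings with no balanced prefix, including "".
def Pre_get_balanced_bracket (p : String) : Prop :=
  ∃ i ∈ List.range' 1 p.toList.length, 2 * ((p.toList.take i).count ')') = i
instance (p : String) : Decidable (Pre_get_balanced_bracket p) := by
  unfold Pre_get_balanced_bracket; infer_instance

def pvWitness_get_balanced_bracket : String := "()"

def Spec_get_balanced_bracket (p : String) (out : String) : Prop := out = get_balanced_bracket_alt p
instance (p : String) (out : String) : Decidable (Spec_get_balanced_bracket p out) := by
  unfold Spec_get_balanced_bracket; infer_instance

-- ===== CLAIM (what is proved, stated in full; the proofs are below) =====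
def Claim_equal_get_balanced_bracket : Prop := ∀ (p : String), Dom_get_balanced_bracket p → Pre_get_balanced_bracket p → Spec_get_balanced_bracket p (get_balanced_bracket p)

-- ===== LEMMAS AND PROOFS =====

-- the running-depth list of cs starting from depth d (proof-only characterisation of B's first loop)
def pvDepths (cs : List Char) (d : Int) : List Int :=
  match cs with
  | [] => []
  | c :: rs =>
    let d' := if c = ')' then d + 1 else d - 1
    d' :: pvDepths rs d'

theorem pvFold_depths (cs : List Char) (d : Int) (acc : List Int) :
    (cs.foldl (fun (s : Int × List Int) c =>
        let x := if c = ')' then s.1 + 1 else s.1 - 1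
        (x, s.2 ++ [x])) (d, acc)).2 = acc ++ pvDepths cs d := by
  induction cs generalizing d acc with
  | nil => simp [pvDepths]
  | cons c rs ih =>
    simp only [List.foldl_cons, pvDepths]
    rw [ih]
    simp

-- A's loop at position i with count d is exactly: find the first 0 in the depth list of the
-- remaining characters, and slice up to that absolute position.
theorem pvA_go_index (p : List Char) (rest : List Char) (i : Nat) (d : Int) :
    pvA_go p rest i d =
      (match PySem.List.index? (pvDepths rest d) 0 with
       | some j => some (PySem.List.slice p (some 0) (some ((i + j + 1 : Nat) : Int)))
       | none => none) := by
  induction rest generalizing i d with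
  | nil => simp [pvA_go, pvDepths, PySem.List.index?_eq_idxOf?]
  | cons c rs ih =>
    simp only [pvA_go, pvDepths]
    by_cases h0 : (if c = ')' then d + 1 else d - 1) = 0
    · rw [if_pos h0, h0, PySem.List.index?_cons_self]
    · rw [if_neg h0, PySem.List.index?_cons_of_ne _ h0,
        ih (i + 1) (if c = ')' then d + 1 else d - 1)]
      cases hidx : PySem.List.index? (pvDepths rs (if c = ')' then d + 1 else d - 1)) 0 with
      | none => simp
      | some j =>
        simp only [Option.map_some]
        have : i + 1 + j + 1 = i + (j + 1) + 1 := by omega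
        rw [this]

theorem get_balanced_bracket_eq_alt (p : String) :
    get_balanced_bracket p = get_balanced_bracket_alt p := by
  unfold get_balanced_bracket get_balanced_bracket_alt
  rw [pvA_go_index]
  simp only [pvFold_depths p.toList 0 [], List.nil_append]
  cases hidx : PySem.List.index? (pvDepths p.toList 0) 0 with
  | none =>
    have hmem : (0 : Int) ∉ pvDepths p.toList 0 :=
      (PySem.List.index?_eq_none_iff _ _).mp hidx
    simp [hmem]
  | some j =>
    have hmem : (0 : Int) ∈ pvDepths p.toList 0 := by
      obtain ⟨hk, hget, -⟩ := PySem.List.getElem_of_index?_eq_some hidx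
      have hm := List.getElem_mem hk
      rwa [hget] at hm
    simp [hmem]

-- ===== VERDICT (by name: the statement is the Claim_ definition above) =====
theorem get_balanced_bracket_spec : Claim_equal_get_balanced_bracket := by
  intro p _ _
  exact get_balanced_bracket_eq_alt p
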